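-- pv_equiv track=rewrite | github.com/nehru52/Sportsai_app | data_collection/ball_tracker.py | _segment_rallies
-- ===== SOURCE A (Python) =====
-- MAX_MISSING = 10     # frames before a rally gap is declared
--
-- def _segment_rallies(positions: list) -> list:
--     """
--     Split trajectory into rallies based on gaps (ball missing > MAX_MISSING frames).
--     Returns list of {"start_frame", "end_frame", "length_frames"}.
--     """
--     rallies = []
--     in_rally = False
--     start = 0
--     missing = 0
--
--     for i, pos in enumerate(positions):
--         if pos is not None:
--             if not in_rally:
--                 in_rally = True
--                 start = i
--             missing = 0
--         else:
--             missing += 1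
--             if in_rally and missing > MAX_MISSING:
--                 rallies.append({"start_frame": start, "end_frame": i - missing, "length_frames": i - missing - start})
--                 in_rally = False
--
--     if in_rally:
--         rallies.append({"start_frame": start, "end_frame": len(positions) - 1, "length_frames": len(positions) - 1 - start})
--
--     return rallies
-- ===== SOURCE B (Python) =====
-- MAX_MISSING = 10     # frames before a rally gap is declared
--
-- def _segment_rallies(positions: list) -> list:
--     # Gap-based grouping of the present (non-None) frame indices.
--     present = [i for i, p in enumerate(positions) if p is not None]
--     if not present:
--         return []
--     runs = []                      # closed (start, last) runs
--     start = last = present[0]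
--     for idx in present[1:]:
--         if idx - last <= MAX_MISSING + 1:
--             last = idx
--         else:
--             runs.append((start, last))
--             start = last = idx
--     if len(positions) - 1 - last <= MAX_MISSING:
--         last = len(positions) - 1   # open rally extends to the final frame
--     runs.append((start, last))
--     return [{"start_frame": s, "end_frame": e, "length_frames": e - s}
--             for s, e in runs]
-- ===== Notes on version B (the rewrite author's own statement) =====
-- stated objective: alternative
-- what changed: B extracts the non-None frame indices once, groups consecutive present indices whose gap is <= MAX_MISSING+1 into runs, extends the last run's end to the final frame when the trailing gap is <= MAX_MISSING, and renders one record per run, replacing A's per-frame in_rally/missing state machine.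
import Mathlib
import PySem

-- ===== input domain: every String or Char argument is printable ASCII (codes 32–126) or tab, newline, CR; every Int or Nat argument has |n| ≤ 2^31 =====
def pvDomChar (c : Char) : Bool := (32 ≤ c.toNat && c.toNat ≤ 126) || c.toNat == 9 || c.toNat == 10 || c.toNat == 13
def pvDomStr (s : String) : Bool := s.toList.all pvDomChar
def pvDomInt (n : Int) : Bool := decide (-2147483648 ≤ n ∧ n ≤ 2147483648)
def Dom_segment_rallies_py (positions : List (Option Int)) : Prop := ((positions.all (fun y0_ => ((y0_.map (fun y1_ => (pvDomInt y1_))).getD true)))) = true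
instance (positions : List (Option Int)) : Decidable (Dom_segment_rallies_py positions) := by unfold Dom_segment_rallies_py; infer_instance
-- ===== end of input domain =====

-- B groups the non-None frame indices by gap ≤ MAX_MISSING+1 instead of A's per-frame
-- in_rally/missing state machine; same output, same O(n) cost (objective: alternative).

def MAXM : Int := 10  -- MAX_MISSING

-- one rally record {"start_frame": s, "end_frame": e, "length_frames": e - s}
def mkRec (s e : Int) : List (String × Int) :=
  [("start_frame", s), ("end_frame", e), ("length_frames", e - s)]

-- ===== PORT A =====
-- A's loop over enumerate(positions) with state (rallies, in_rally, start, missing)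
def segA : List (Option Int) → Int → List (List (String × Int)) → Bool → Int → Int →
    List (List (String × Int)) × Bool × Int × Int
  | [], _, rallies, inr, start, missing => (rallies, inr, start, missing)
  | pos :: rest, i, rallies, inr, start, missing =>
    match pos with
    | some _ => segA rest (i + 1) rallies true (if inr then start else i) 0
    | none =>
      let m := missing + 1
      if inr ∧ m > MAXM then
        segA rest (i + 1) (rallies ++ [mkRec start (i - m)]) false start m
      else
        segA rest (i + 1) rallies inr start m

def segment_rallies_py (positions : List (Option Int)) : List (List (String × Int)) :=
  let r := segA positions 0 [] false 0 0
  if r.2.1 then r.1 ++ [mkRec r.2.2.1 ((positions.length : Int) - 1)] else r.1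

-- ===== PORT B =====
-- present = [i for i, p in enumerate(positions) if p is not None]
def presentIdx : List (Option Int) → Int → List Int
  | [], _ => []
  | p :: rest, i =>
    match p with
    | some _ => i :: presentIdx rest (i + 1)
    | none => presentIdx rest (i + 1)

-- B's loop over present[1:] with state (runs, start, last)
def groupRuns : List Int → List (Int × Int) → Int → Int → List (Int × Int) × Int × Int
  | [], runs, start, last => (runs, start, last)
  | idx :: rest, runs, start, last =>
    if idx - last ≤ MAXM + 1 then groupRuns rest runs start idx
    else groupRuns rest (runs ++ [(start, last)]) idx idx

-- the tail of B: extend the open last run to the final frame, close it, render runs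
def finishB (r : List (Int × Int) × Int × Int) (n1 : Int) : List (List (String × Int)) :=
  let last := if n1 - r.2.2 ≤ MAXM then n1 else r.2.2
  (r.1 ++ [(r.2.1, last)]).map (fun se => mkRec se.1 se.2)

def segment_rallies_py_alt (positions : List (Option Int)) : List (List (String × Int)) :=
  match presentIdx positions 0 with
  | [] => []
  | p0 :: rest => finishB (groupRuns rest [] p0 p0) ((positions.length : Int) - 1)

-- ===== PRECONDITION & SPEC =====
def Spec_segment_rallies_py (positions : List (Option Int)) (out : List (List (String × Int))) : Prop := out = segment_rallies_py_alt positions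
instance (positions : List (Option Int)) (out : List (List (String × Int))) : Decidable (Spec_segment_rallies_py positions out) := by unfold Spec_segment_rallies_py; infer_instance

-- ===== CLAIM (what is proved, stated in full; the proofs are below) =====
def Claim_equal_segment_rallies_py : Prop := ∀ (positions : List (Option Int)), Dom_segment_rallies_py positions → Spec_segment_rallies_py positions (segment_rallies_py positions)

-- ===== LEMMAS AND PROOFS =====

-- A's loop followed by A's final "if in_rally: append" step
def outA (l : List (Option Int)) (i : Int) (rallies : List (List (String × Int)))
    (inr : Bool) (start missing n1 : Int) : List (List (String × Int)) :=
  let r := segA l i rallies inr start missing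
  if r.2.1 then r.1 ++ [mkRec r.2.2.1 n1] else r.1

theorem outA_some (rest : List (Option Int)) (v i : Int) (R : List (List (String × Int)))
    (inr : Bool) (s m n1 : Int) :
    outA (some v :: rest) i R inr s m n1 = outA rest (i + 1) R true (if inr then s else i) 0 n1 := by
  simp only [outA, segA]

theorem segA_none_pos (rest : List (Option Int)) (i : Int) (R : List (List (String × Int)))
    (s m : Int) (h : m + 1 > MAXM) :
    segA (none :: rest) i R true s m
      = segA rest (i + 1) (R ++ [mkRec s (i - (m + 1))]) false s (m + 1) := by
  simp only [segA]
  split_ifs with h'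
  · rfl
  · exact absurd ⟨trivial, h⟩ h'

theorem segA_none_neg (rest : List (Option Int)) (i : Int) (R : List (List (String × Int)))
    (s m : Int) (h : ¬ m + 1 > MAXM) :
    segA (none :: rest) i R true s m = segA rest (i + 1) R true s (m + 1) := by
  simp only [segA]
  split_ifs with h'
  · exfalso; simp only [MAXM] at h h'; omega
  · rfl

theorem segA_none_false (rest : List (Option Int)) (i : Int) (R : List (List (String × Int)))
    (s m : Int) :
    segA (none :: rest) i R false s m = segA rest (i + 1) R false s (m + 1) := by
  simp [segA]

theorem outA_none_pos (rest : List (Option Int)) (i : Int) (R : List (List (String × Int)))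
    (s m n1 : Int) (h : m + 1 > MAXM) :
    outA (none :: rest) i R true s m n1
      = outA rest (i + 1) (R ++ [mkRec s (i - (m + 1))]) false s (m + 1) n1 := by
  simp only [outA]; rw [segA_none_pos _ _ _ _ _ h]

theorem outA_none_neg (rest : List (Option Int)) (i : Int) (R : List (List (String × Int)))
    (s m n1 : Int) (h : ¬ m + 1 > MAXM) :
    outA (none :: rest) i R true s m n1 = outA rest (i + 1) R true s (m + 1) n1 := by
  simp only [outA]; rw [segA_none_neg _ _ _ _ _ h]

theorem outA_none_false (rest : List (Option Int)) (i : Int) (R : List (List (String × Int)))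
    (s m n1 : Int) :
    outA (none :: rest) i R false s m n1 = outA rest (i + 1) R false s (m + 1) n1 := by
  simp only [outA]; rw [segA_none_false]

-- Simulation: once a rally has started, A's state machine and B's run-grouping agree.
-- inr = true : A is in a rally started at s whose last ball was at index last;
-- inr = false: A has just closed the run (s, last) (the gap to index i exceeds 11).
theorem simAB : ∀ (l : List (Option Int)) (i : Int) (runs : List (Int × Int)) (inr : Bool)
    (s last mA n1 : Int),
    n1 = i + (l.length : Int) - 1 →
    (inr = true → mA = i - 1 - last ∧ i - 1 - last ≤ 10) →
    (inr = false → i - last > 11) →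
    outA l i
      (if inr then runs.map (fun se => mkRec se.1 se.2)
       else (runs ++ [(s, last)]).map (fun se => mkRec se.1 se.2))
      inr s mA n1
      = finishB (groupRuns (presentIdx l i) runs s last) n1 := by
  intro l
  induction l with
  | nil =>
    intro i runs inr s last mA n1 hn ht hf
    cases inr with
    | true =>
      obtain ⟨hm, hle⟩ := ht rfl
      simp only [presentIdx, groupRuns, outA, segA, finishB, MAXM, List.length_nil] at *
      have h1 : n1 - last ≤ 10 := by omega
      simp [h1, List.map_append]
    | false =>
      have hgt := hf rfl
      simp only [presentIdx, groupRuns, outA, segA, finishB, MAXM, List.length_nil] at *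
      have h1 : ¬ n1 - last ≤ 10 := by omega
      simp [h1]
  | cons pos rest ih =>
    intro i runs inr s last mA n1 hn ht hf
    have hn' : n1 = (i + 1) + (rest.length : Int) - 1 := by
      simp only [List.length_cons] at hn; push_cast at hn ⊢; omega
    cases pos with
    | some v =>
      cases inr with
      | true =>
        obtain ⟨hm, hle⟩ := ht rfl
        rw [outA_some]
        simp only [presentIdx, groupRuns]
        have hgap : i - last ≤ MAXM + 1 := by simp only [MAXM]; omega
        rw [if_pos hgap]
        have := ih (i + 1) runs true s i 0 n1 hn'
          (by intro _; exact ⟨by omega, by omega⟩) (by simp)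
        simpa using this
      | false =>
        have hgt := hf rfl
        rw [outA_some]
        simp only [presentIdx, groupRuns]
        have hgap : ¬ i - last ≤ MAXM + 1 := by simp only [MAXM]; omega
        rw [if_neg hgap]
        have := ih (i + 1) (runs ++ [(s, last)]) true i i 0 n1 hn'
          (by intro _; exact ⟨by omega, by omega⟩) (by simp)
        simpa using this
    | none =>
      cases inr with
      | true =>
        obtain ⟨hm, hle⟩ := ht rfl
        by_cases hov : mA + 1 > MAXM
        · rw [outA_none_pos _ _ _ _ _ _ hov]
          simp only [MAXM] at hov
          have hend : i - (mA + 1) = last := by omega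
          have := ih (i + 1) runs false s last (mA + 1) n1 hn'
            (by intro h; cases h) (by intro _; omega)
          rw [if_neg (by simp)] at this
          simp only [presentIdx]
          simpa [hend, List.map_append] using this
        · rw [outA_none_neg _ _ _ _ _ _ hov]
          simp only [MAXM] at hov
          have := ih (i + 1) runs true s last (mA + 1) n1 hn'
            (by intro _; exact ⟨by omega, by omega⟩) (by intro h; cases h)
          simp only [presentIdx]
          simpa using this
      | false =>
        have hgt := hf rfl
        rw [outA_none_false]
        have := ih (i + 1) runs false s last (mA + 1) n1 hn'
          (by intro h; cases h) (by intro _; omega)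
        simp only [presentIdx]
        simpa using this

-- Before the first ball appears, A stays out of any rally and appends nothing.
theorem initSim : ∀ (l : List (Option Int)) (i sA mA n1 : Int),
    n1 = i + (l.length : Int) - 1 →
    outA l i [] false sA mA n1
      = (match presentIdx l i with
         | [] => []
         | p0 :: rest => finishB (groupRuns rest [] p0 p0) n1) := by
  intro l
  induction l with
  | nil => intro i sA mA n1 _; simp [outA, segA, presentIdx]
  | cons pos rest ih =>
    intro i sA mA n1 hn
    have hn' : n1 = (i + 1) + (rest.length : Int) - 1 := by
      simp only [List.length_cons] at hn; push_cast at hn ⊢; omega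
    cases pos with
    | some v =>
      rw [outA_some]
      simp only [presentIdx]
      have := simAB rest (i + 1) [] true i i 0 n1 hn'
        (by intro _; exact ⟨by omega, by omega⟩) (by simp)
      simpa using this
    | none =>
      rw [outA_none_false]
      simp only [presentIdx]
      exact ih (i + 1) sA (mA + 1) n1 hn'

-- ===== VERDICT (by name: the statement is the Claim_ definition above) =====
theorem segment_rallies_py_spec : Claim_equal_segment_rallies_py := by
  intro positions _
  show segment_rallies_py positions = segment_rallies_py_alt positions
  have h := initSim positions 0 0 0 ((positions.length : Int) - 1) (by omega)
  simpa [segment_rallies_py, segment_rallies_py_alt, outA] using h
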